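-- pv_equiv track=rewrite | github.com/ohzeno/Algo | Programmers/Previous KAKAO/Lv.2/[3차] 방금그곡.py | solution
-- ===== SOURCE A (Python) =====
-- def solution(m, musicinfos):
--     # 네오가 기억한 멜로디, 악보에 사용되는 음은
--     # C, C#, D, D#, E, F, F#, G, G#, A, A#, B 12개다.
--     # 각 음은 1분에 1개씩 재생됨. 음악은 반드시 처음부터 재생.
--     # 음악 길이보다 재생시간이 길면 끊김없이 반복재생.
--     # 음악 길이보다 재생시간이 짧으면 끊김.
--     # 음악이 00:00 넘겨서까지 재생되진 않음.
--     # m: 네오가 기억한 멜로디. 1~1439 길이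
--     # musicinfos는 100개 이하 곡 정보.
--     # 시작 시각, 종료 시각, 음악 제목, 악보 정보가 ','로 구분되어 들어있음.
--     # 시각: 24시간 HH:MM 형식. 제목은 ',' 이외 문자 1~64 길이 문자열.
--     # 악보 정보는 1~1439 길이
--     def time_to_min(datas):
--         hour, minute = datas.split(':')
--         return int(hour) * 60 + int(minute)
--     def remove_sharp(datas):  # '#' 처리
--         datas = datas.replace('C#', 'c').replace('D#', 'd').replace('F#', 'f').replace('G#', 'g').replace('A#', 'a')
--         return datas
--     m = remove_sharp(m)
--     logs = []
--     for order, music in enumerate(musicinfos):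
--         st, ed, title, score = music.split(',')
--         score = remove_sharp(score)
--         len_music = len(score)
--         tmp_st, tmp_ed = map(time_to_min, (st, ed))
--         if tmp_ed < tmp_st:  # 종료 시각이 00:00이면
--             tmp_ed = time_to_min('24:00')
--         elif tmp_ed == tmp_st:  # 방송 시간이 0이면 체크X
--             continue
--         on_air_time = tmp_ed - tmp_st
--         if on_air_time < len_music:  # 방송 시간이 곡 길이보다 짧으면 끊기
--             # 방송시간을 마이너스로 넣어서 sort()하면 방송시간 긴 순, 들어간 순서로 정렬됨.
--             logs.append([-on_air_time, order, title, score[:on_air_time]])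
--         else:  # 방송 시간이 곡 길이보다 길면 반복재생
--             tmp_score = score * (on_air_time // len_music + 1)
--             logs.append([-on_air_time, order, title, tmp_score[:on_air_time]])
--     involve = []
--     for datas in logs:
--         if m in datas[3]:  # 들은 멜로디가 포함되면 involve에 넣기
--             involve.append(datas)
--     # 조건이 일치하는 음악이 없을 때는 "(None)"를 반환
--     if not involve:
--         return "(None)"
--     else:
--         # 조건이 일치하는 음악이 여럿이면 라디오에서 재생된 시간이 제일 긴 음악 제목을 반환.
--         # 재생된 시간도 같을 경우 먼저 입력된 음악 제목을 반환.
--         if len(involve) > 1: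
--             involve.sort()
--         return involve[0][2]
-- ===== SOURCE B (Python) =====
-- def solution(m, musicinfos):
--     def time_to_min(t):
--         h, mi = t.split(':')
--         return int(h) * 60 + int(mi)
--
--     def remove_sharp(s):
--         return s.replace('C#', 'c').replace('D#', 'd').replace('F#', 'f').replace('G#', 'g').replace('A#', 'a')
--
--     m = remove_sharp(m)
--     best = None  # (duration, order, title) with the longest duration, earliest order on ties
--     for order, music in enumerate(musicinfos):
--         st, ed, title, score = music.split(',')
--         start, end = time_to_min(st), time_to_min(ed)
--         if end < start:      # broadcast runs up to midnight
--             end = 24 * 60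
--         duration = end - start
--         if duration == 0:    # zero-length broadcast: nothing played
--             continue
--         score = remove_sharp(score)
--         played = (score * (-(-duration // len(score))))[:duration]
--         if m in played and (best is None or duration > best[0]):
--             best = (duration, order, title)
--     return best[2] if best is not None else '(None)'
-- ===== Notes on version B (the rewrite author's own statement) =====
-- stated objective: simpler
-- what changed: One pass with a running best (duration, order, title) updated on strict improvement replaces A's build-logs / filter / sort pipeline, and a single ceil-division repeat-then-truncate replaces A's short/long branch pair.
-- outside the precondition, e.g. on solution('AB', ['24:01,00:00,T,ABCD']): A returns 'T', B returns '(None)'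
import Mathlib
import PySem

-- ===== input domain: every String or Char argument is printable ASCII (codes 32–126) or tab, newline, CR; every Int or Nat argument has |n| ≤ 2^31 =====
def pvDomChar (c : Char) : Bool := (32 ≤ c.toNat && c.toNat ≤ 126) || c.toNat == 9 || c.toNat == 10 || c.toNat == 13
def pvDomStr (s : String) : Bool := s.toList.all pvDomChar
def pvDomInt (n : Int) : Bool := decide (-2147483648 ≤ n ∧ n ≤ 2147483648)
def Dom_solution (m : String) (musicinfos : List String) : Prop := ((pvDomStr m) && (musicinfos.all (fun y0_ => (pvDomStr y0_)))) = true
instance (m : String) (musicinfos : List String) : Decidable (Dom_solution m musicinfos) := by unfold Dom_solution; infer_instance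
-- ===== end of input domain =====

-- B replaces A's build-logs / filter / sort pipeline by one pass with a running best and a
-- single ceil-division repeat-then-truncate; equal return values are proved on Pre_solution.

-- shared helpers: both Pythons contain the identical time_to_min / remove_sharp code
def pvRemoveSharp (s : String) : String :=
  PySem.Str.replace (PySem.Str.replace (PySem.Str.replace (PySem.Str.replace
    (PySem.Str.replace s "C#" "c") "D#" "d") "F#" "f") "G#" "g") "A#" "a"

def pvTimeToMin? (s : String) : Option Int :=
  match PySem.Str.split? s ":" with
  | some [h, mi] =>
    match PySem.Int.ofStr? h, PySem.Int.ofStr? mi with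
    | some hh, some mm => some (hh * 60 + mm)
    | _, _ => none
  | _ => none

-- ===== PORT A =====
-- one log entry: [-on_air_time, order, title, played]; none = this Python line raises
def pvBuildA (order onAir : Int) (title score : String) : Option (Int × Int × String × String) :=
  let lenMusic : Int := PySem.Str.len score
  if onAir < lenMusic then
    some (-onAir, order, title, PySem.Str.slice score none (some onAir))
  else
    match PySem.Int.floordiv? onAir lenMusic with
    | some q =>
        let tmpScore := String.ofList (PySem.List.pyRepeat score.toList (q + 1))
        some (-onAir, order, title, PySem.Str.slice tmpScore none (some onAir))
    | none => none

-- outer none = raise; some none = the 'continue' branch; time_to_min('24:00') = 1440 inlined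
def pvEntryA? (order : Int) (music : String) : Option (Option (Int × Int × String × String)) :=
  match PySem.Str.split? music "," with
  | some [st, ed, title, score0] =>
    let score := pvRemoveSharp score0
    match pvTimeToMin? st, pvTimeToMin? ed with
    | some tmpSt, some tmpEd =>
      if tmpEd < tmpSt then (pvBuildA order (1440 - tmpSt) title score).map some
      else if tmpEd = tmpSt then some none
      else (pvBuildA order (tmpEd - tmpSt) title score).map some
    | _, _ => none
  | _ => none

def pvLogsA? : List (Int × String) → Option (List (Int × Int × String × String))
  | [] => some []
  | (o, mus) :: rest =>
    match pvEntryA? o mus, pvLogsA? rest with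
    | some e?, some rest' =>
      some (match e? with | none => rest' | some e => e :: rest')
    | _, _ => none

-- Python sorts the 4-element lists lexicographically; the 'order' field (from enumerate) is
-- distinct across entries, so the comparison never reaches title/played: the first two fields
-- are an exact sort key (List ℤ carries Python's lexicographic list order).
def pvKeyA (e : Int × Int × String × String) : List Int := [e.1, e.2.1]

def solution (m : String) (musicinfos : List String) : String :=
  let m' := pvRemoveSharp m
  match pvLogsA? (PySem.List.enumerate musicinfos) with
  | none => ""   -- some entry raised: unreachable under Pre_solution
  | some logs =>
    let involve := logs.filter (fun e => PySem.Str.isIn m' e.2.2.2)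
    match involve with
    | [] => "(None)"
    | e :: _ =>
      if involve.length > 1 then
        match @PySem.List.sorted _ (List Int) List.instLinearOrder.toLT
            LinearOrder.toDecidableLT involve pvKeyA false with
        | [] => ""        -- unreachable: sorting a nonempty list
        | e' :: _ => e'.2.2.1
      else e.2.2.1

-- ===== PORT B =====
-- one loop step of Source B; best = (duration, order, title); outer none = raise
def pvStepB? (m' : String) (best : Option (Int × Int × String)) (p : Int × String) :
    Option (Option (Int × Int × String)) :=
  match PySem.Str.split? p.2 "," with
  | some [st, ed, title, score0] =>
    match pvTimeToMin? st, pvTimeToMin? ed with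
    | some start, some end0 =>
      let end1 := if end0 < start then 24 * 60 else end0
      let duration := end1 - start
      if duration = 0 then some best
      else
        let score := pvRemoveSharp score0
        match PySem.Int.floordiv? (-duration) (PySem.Str.len score) with
        | some nq =>
          let played := PySem.Str.slice (String.ofList (PySem.List.pyRepeat score.toList (-nq)))
              none (some duration)
          if PySem.Str.isIn m' played then
            match best with
            | none => some (some (duration, p.1, title))
            | some b => if b.1 < duration then some (some (duration, p.1, title)) else some best
          else some best
        | none => none
    | _, _ => none
  | _ => none

def pvRunB? (m' : String) (best : Option (Int × Int × String)) :
    List (Int × String) → Option (Option (Int × Int × String))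
  | [] => some best
  | p :: rest =>
    match pvStepB? m' best p with
    | some best' => pvRunB? m' best' rest
    | none => none

def solution_alt (m : String) (musicinfos : List String) : String :=
  let m' := pvRemoveSharp m
  match pvRunB? m' none (PySem.List.enumerate musicinfos) with
  | none => ""   -- some entry raised: unreachable under Pre_solution
  | some none => "(None)"
  | some (some b) => b.2.2

-- ===== PRECONDITION & SPEC =====
-- one entry parses: 4 comma-fields, both times int-parsable; beyond exactness, Pre_ restricts
-- the times to real clock minutes 0 ≤ t < 1440 (the problem's HH:MM 24-hour format): on
-- out-of-range times A still returns, via its 24:00-wrap producing negative durations and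
-- negative-length slices — an artefact B does not reproduce (see claim cites).
def pvOkB (music : String) : Bool :=
  match PySem.Str.split? music "," with
  | some [st, ed, _, score] =>
    match pvTimeToMin? st, pvTimeToMin? ed with
    | some a, some b =>
      decide (0 ≤ a) && decide (a < 1440) && decide (0 ≤ b) && decide (b < 1440) &&
        (a == b || !(pvRemoveSharp score == ""))   -- a ≠ b would reach the division: score nonempty
    | _, _ => false
  | _ => false

def Pre_solution (m : String) (musicinfos : List String) : Prop :=
  ∀ music ∈ musicinfos, pvOkB music = true
instance (m : String) (musicinfos : List String) : Decidable (Pre_solution m musicinfos) := by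
  unfold Pre_solution; infer_instance

def pvWitness_solution : String × List String :=
  ("ABC", ["12:00,12:03,HELLO,C#BEFGAB", "11:00,11:00,ZERO,ABC"])

def Spec_solution (m : String) (musicinfos : List String) (out : String) : Prop := out = solution_alt m musicinfos
instance (m : String) (musicinfos : List String) (out : String) : Decidable (Spec_solution m musicinfos out) := by unfold Spec_solution; infer_instance

-- ===== CLAIM (what is proved, stated in full; the proofs are below) =====
def Claim_equal_solution : Prop := ∀ (m : String) (musicinfos : List String), Dom_solution m musicinfos → Pre_solution m musicinfos → Spec_solution m musicinfos (solution m musicinfos)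


-- ===== LEMMAS AND PROOFS =====

-- proof-side views of the two loop bodies
def pvProj (e : Int × Int × String × String) : Int × Int × String := (-e.1, e.2.1, e.2.2.1)

def pvG (best : Option (Int × Int × String)) (e : Int × Int × String × String) :
    Option (Int × Int × String) :=
  match best with
  | none => some (pvProj e)
  | some b => if b.1 < -e.1 then some (pvProj e) else best

def pvBStep (m' : String) (best : Option (Int × Int × String))
    (e : Int × Int × String × String) : Option (Int × Int × String) :=
  if PySem.Str.isIn m' e.2.2.2 then pvG best e else best

def pvKeyT (r : Int × Int × String) : List Int := [-r.1, r.2.1]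

theorem pvKeyT_proj (e : Int × Int × String × String) : pvKeyT (pvProj e) = pvKeyA e := by
  simp [pvKeyT, pvProj, pvKeyA]

-- the order the sorted port uses on keys
abbrev pvKlt (x y : List Int) : Prop := @LT.lt (List Int) List.instLinearOrder.toLT x y

theorem pvKlt_first {a b a' b' : Int} (h : a < a') : pvKlt [a, b] [a', b'] := List.Lex.rel h

theorem pvKlt_second {a b b' : Int} (h : b < b') : pvKlt [a, b] [a, b'] :=
  List.Lex.cons (List.Lex.rel h)

theorem take_flatten_replicate {A : Type} (s : List A) (d : Nat) :
    forall {n n' : Nat}, d <= n * s.length -> d <= n' * s.length ->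
    ((List.replicate n s).flatten).take d = ((List.replicate n' s).flatten).take d := by
  have key : forall {n n' : Nat}, n <= n' -> d <= n * s.length ->
      ((List.replicate n' s).flatten).take d = ((List.replicate n s).flatten).take d := by
    intro n n' hle hd
    have : n' = n + (n' - n) := by omega
    rw [this, List.replicate_add, List.flatten_append]
    apply List.take_append_of_le_length
    simpa using hd
  intro n n' h h'
  rcases le_total n n' with hle | hle
  · rw [key hle h]
  · rw [key hle h']

theorem toNat_le_mul_len {s : List Char} {d k : Int} (h : d <= k * s.length) :
    d.toNat <= k.toNat * s.length := by
  have hk : (d : Int) <= (k.toNat : Int) * s.length := by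
    rcases le_or_gt k 0 with hk | hk
    · have h1 : k * s.length <= 0 := mul_nonpos_of_nonpos_of_nonneg hk (by positivity)
      have h2 : (0 : Int) <= (k.toNat : Int) * s.length := by positivity
      omega
    · rw [Int.toNat_of_nonneg (le_of_lt hk)]; exact h
  exact Int.toNat_le.mpr (by exact_mod_cast hk)

theorem pyRepeat_take_eq {s : List Char} {d k k' : Int}
    (h : d <= k * s.length) (h' : d <= k' * s.length) :
    (PySem.List.pyRepeat s k).take d.toNat = (PySem.List.pyRepeat s k').take d.toNat := by
  rw [PySem.List.pyRepeat.eq_1, PySem.List.pyRepeat.eq_1]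
  exact take_flatten_replicate s d.toNat (toNat_le_mul_len h) (toNat_le_mul_len h')

theorem slice_take (s : String) {d : Int} (hd : 0 <= d) :
    (PySem.Str.slice s none (some d)).toList = s.toList.take d.toNat := by
  rw [PySem.Str.toList_slice, PySem.Chars.slice_eq_listSlice]
  exact PySem.List.slice_to s.toList hd

-- B's played string: score repeated ceil(duration/len) times, truncated to duration
def pvPlayedB (d : Int) (sc : String) : String :=
  PySem.Str.slice
    (String.ofList (PySem.List.pyRepeat sc.toList (-(PySem.Int.floordiv (-d) (PySem.Str.len sc)))))
    none (some d)

theorem buildA_eq (o d : Int) (t sc : String) (hd : 1 <= d) (hsc : sc.toList ≠ []) :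
    pvBuildA o d t sc = some (-d, o, t, pvPlayedB d sc) := by
  have hn : 0 < (sc.toList.length : Int) := by
    have := List.length_pos_iff.mpr hsc; exact_mod_cast this
  have hlen : PySem.Str.len sc = (sc.toList.length : Int) := PySem.Str.len_eq sc
  have hceil := (PySem.Int.neg_floordiv_neg_eq_iff_of_pos (a := d) hn).mp rfl
  have hrep1 : PySem.List.pyRepeat sc.toList 1 = sc.toList := by
    rw [PySem.List.pyRepeat.eq_1]; simp
  have hd0 : (0 : Int) <= d := by omega
  simp only [pvBuildA, pvPlayedB, hlen]
  split_ifs with hlt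
  · refine congrArg (fun x => some (-d, o, t, x)) (String.toList_inj.mp ?_)
    rw [slice_take sc hd0, slice_take _ hd0, String.toList_ofList]
    have h1 : d <= (1 : Int) * (sc.toList.length : Int) := by linarith
    calc List.take d.toNat sc.toList
        = List.take d.toNat (PySem.List.pyRepeat sc.toList 1) := by rw [hrep1]
      _ = List.take d.toNat (PySem.List.pyRepeat sc.toList
            (-(PySem.Int.floordiv (-d) (sc.toList.length : Int)))) :=
          pyRepeat_take_eq h1 hceil.2
  · have hne : (sc.toList.length : Int) ≠ 0 := by omega
    have hq : PySem.Int.floordiv? d (sc.toList.length : Int)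
        = some (PySem.Int.floordiv d (sc.toList.length : Int)) := by
      simp [PySem.Int.floordiv?, PySem.Int.floordiv]
      exact fun h => hsc (by simp [h])
    rw [hq]
    refine congrArg (fun x => some (-d, o, t, x)) (String.toList_inj.mp ?_)
    rw [slice_take _ hd0, slice_take _ hd0, String.toList_ofList, String.toList_ofList]
    have hmod := PySem.Int.floordiv_mul_add_mod d (sc.toList.length : Int)
    have hmlt := PySem.Int.mod_lt d hn
    refine pyRepeat_take_eq ?_ hceil.2
    have hexp : (PySem.Int.floordiv d (sc.toList.length : Int) + 1) * (sc.toList.length : Int)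
        = PySem.Int.floordiv d (sc.toList.length : Int) * (sc.toList.length : Int)
          + (sc.toList.length : Int) := by ring
    linarith

theorem toList_ne_nil_of_ne {s : String} (h : ¬ s = "") : s.toList ≠ [] :=
  fun hl => h (String.toList_eq_nil_iff.mp hl)

theorem floordiv?_of_ne {a b : Int} (hb : b ≠ 0) :
    PySem.Int.floordiv? a b = some (PySem.Int.floordiv a b) := by
  simp [PySem.Int.floordiv?, PySem.Int.floordiv, hb]

set_option maxHeartbeats 1000000 in
theorem step_eq (m' : String) (o : Int) (music : String) (h : pvOkB music = true) :
    ∃ e?, pvEntryA? o music = some e? ∧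
      ∀ best, pvStepB? m' best (o, music) = some (Option.elim e? best (pvBStep m' best)) := by
  rcases hsp : PySem.Str.split? music "," with _ | l
  · rw [pvOkB, hsp] at h; exact Bool.noConfusion h
  rcases l with _ | ⟨st, l⟩; · rw [pvOkB, hsp] at h; exact Bool.noConfusion h
  rcases l with _ | ⟨ed, l⟩; · rw [pvOkB, hsp] at h; exact Bool.noConfusion h
  rcases l with _ | ⟨title, l⟩; · rw [pvOkB, hsp] at h; exact Bool.noConfusion h
  rcases l with _ | ⟨score0, l⟩; · rw [pvOkB, hsp] at h; exact Bool.noConfusion h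
  rcases l with _ | ⟨x, l⟩
  case cons => rw [pvOkB, hsp] at h; exact Bool.noConfusion h
  rw [pvOkB, hsp] at h
  replace h : (match pvTimeToMin? st, pvTimeToMin? ed with
    | some a, some b =>
      decide (0 <= a) && decide (a < 1440) && decide (0 <= b) && decide (b < 1440) &&
        (a == b || !(pvRemoveSharp score0 == ""))
    | _, _ => false) = true := h
  rcases hta : pvTimeToMin? st with _ | a
  · rw [hta] at h; exact Bool.noConfusion h
  rcases htb : pvTimeToMin? ed with _ | b
  · rw [hta, htb] at h; exact Bool.noConfusion h
  rw [hta, htb] at h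
  simp only [Bool.and_eq_true, Bool.or_eq_true, Bool.not_eq_true', beq_eq_false_iff_ne,
    decide_eq_true_eq, beq_iff_eq] at h
  obtain ⟨⟨⟨⟨ha0, ha1⟩, hb0⟩, hb1⟩, hsc⟩ := h
  by_cases hab : a = b
  · -- zero-duration broadcast: both sides skip
    subst hab
    refine ⟨none, ?_, ?_⟩
    · rw [pvEntryA?]
      simp only [hsp, hta, htb]
      rw [if_neg (lt_irrefl a)]
      simp
    · intro best
      rw [pvStepB?]
      simp only [hsp, hta, htb]
      rw [if_neg (lt_irrefl a)]
      simp [Option.elim]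
  · have hsc' : (pvRemoveSharp score0).toList ≠ [] :=
      toList_ne_nil_of_ne (hsc.resolve_left hab)
    have hlenpos : 0 < ((pvRemoveSharp score0).toList.length : Int) := by
      have := List.length_pos_iff.mpr hsc'; exact_mod_cast this
    have hlen : PySem.Str.len (pvRemoveSharp score0)
        = ((pvRemoveSharp score0).toList.length : Int) := PySem.Str.len_eq _
    have hb0 : PySem.Str.len (pvRemoveSharp score0) ≠ 0 := by rw [hlen]; omega
    by_cases hba : b < a
    · -- wraps past midnight: effective end 24:00
      have hd : 1 <= 1440 - a := by omega
      refine ⟨some (-(1440 - a), o, title, pvPlayedB (1440 - a) (pvRemoveSharp score0)), ?_, ?_⟩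
      · rw [pvEntryA?]
        simp only [hsp, hta, htb]
        rw [if_pos hba, buildA_eq o (1440 - a) title _ hd hsc']
        rfl
      · intro best
        rw [pvStepB?]
        simp only [hsp, hta, htb]
        rw [if_pos hba]
        have h1440 : (24 * 60 : Int) - a = 1440 - a := by norm_num
        rw [h1440, if_neg (by omega : ¬ (1440 - a = 0)), floordiv?_of_ne hb0]
        simp only [Option.elim, pvBStep, pvG, pvProj, pvPlayedB, neg_neg]
        cases best <;> simp only [] <;> split_ifs <;> simp
    · -- ordinary broadcast
      have hd : 1 <= b - a := by omega
      refine ⟨some (-(b - a), o, title, pvPlayedB (b - a) (pvRemoveSharp score0)), ?_, ?_⟩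
      · rw [pvEntryA?]
        simp only [hsp, hta, htb]
        rw [if_neg hba, if_neg (fun hc => hab hc.symm), buildA_eq o (b - a) title _ hd hsc']
        rfl
      · intro best
        rw [pvStepB?]
        simp only [hsp, hta, htb]
        rw [if_neg hba, if_neg (by omega : ¬ (b - a = 0)), floordiv?_of_ne hb0]
        simp only [Option.elim, pvBStep, pvG, pvProj, pvPlayedB, neg_neg]
        cases best <;> simp only [] <;> split_ifs <;> simp

theorem runB_eq (m' : String) :
    ∀ (xs : List (Int × String)) (best : Option (Int × Int × String)),
      (∀ p ∈ xs, pvOkB p.2 = true) →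
      pvRunB? m' best xs = (pvLogsA? xs).map (fun L => L.foldl (pvBStep m') best) := by
  intro xs
  induction xs with
  | nil => intro best _; simp [pvRunB?, pvLogsA?]
  | cons p rest ih =>
    intro best hall
    obtain ⟨o, mus⟩ := p
    obtain ⟨e?, hA, hB⟩ := step_eq m' o mus (hall (o, mus) (by simp))
    have hrest : ∀ q ∈ rest, pvOkB q.2 = true := fun q hq => hall q (by simp [hq])
    have hih := ih (e?.elim best (pvBStep m' best)) hrest
    cases hL : pvLogsA? rest with
    | none =>
      rw [hL] at hih
      simp only [pvRunB?, hB best, pvLogsA?, hA, hL, hih]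
      simp
    | some L =>
      rw [hL] at hih
      cases e? with
      | none =>
        simp only [pvRunB?, hB best, pvLogsA?, hA, hL, hih]
        simp [Option.elim]
      | some e =>
        simp only [pvRunB?, hB best, pvLogsA?, hA, hL, hih]
        simp [Option.elim, List.foldl_cons]

theorem buildA_order {o d : Int} {t sc : String} {e : Int × Int × String × String}
    (h : pvBuildA o d t sc = some e) : e.2.1 = o := by
  rw [pvBuildA] at h
  split_ifs at h with h1
  · cases h; rfl
  · rcases hq : PySem.Int.floordiv? d (PySem.Str.len sc) with _ | q <;> rw [hq] at h
    · simp at h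
    · cases h; rfl

theorem entryA_order {o : Int} {music : String} {e : Int × Int × String × String}
    (h : pvEntryA? o music = some (some e)) : e.2.1 = o := by
  rw [pvEntryA?] at h
  rcases hsp : PySem.Str.split? music "," with _ | l <;> rw [hsp] at h
  · simp at h
  rcases l with _ | ⟨st, l⟩; · simp at h
  rcases l with _ | ⟨ed, l⟩; · simp at h
  rcases l with _ | ⟨title, l⟩; · simp at h
  rcases l with _ | ⟨score0, l⟩; · simp at h
  rcases l with _ | ⟨x, l⟩
  case cons => simp at h
  replace h : (match pvTimeToMin? st, pvTimeToMin? ed with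
    | some tmpSt, some tmpEd =>
      if tmpEd < tmpSt then Option.map some (pvBuildA o (1440 - tmpSt) title (pvRemoveSharp score0))
      else if tmpEd = tmpSt then some none
      else Option.map some (pvBuildA o (tmpEd - tmpSt) title (pvRemoveSharp score0))
    | _, _ => none) = some (some e) := h
  rcases hta : pvTimeToMin? st with _ | a <;> rw [hta] at h
  · simp at h
  rcases htb : pvTimeToMin? ed with _ | b <;> rw [htb] at h
  · simp at h
  replace h : (if b < a then Option.map some (pvBuildA o (1440 - a) title (pvRemoveSharp score0))
      else if b = a then some none
      else Option.map some (pvBuildA o (b - a) title (pvRemoveSharp score0))) = some (some e) := h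
  split_ifs at h
  · rcases hb : pvBuildA o (1440 - a) title (pvRemoveSharp score0) with _ | e' <;>
      rw [hb] at h
    · simp at h
    · simp only [Option.map] at h
      cases h; exact buildA_order hb
  · simp at h
  · rcases hb : pvBuildA o (b - a) title (pvRemoveSharp score0) with _ | e' <;>
      rw [hb] at h
    · simp at h
    · simp only [Option.map] at h
      cases h; exact buildA_order hb

theorem logsA_orders :
    ∀ (xs : List (Int × String)) (L : List (Int × Int × String × String)),
      pvLogsA? xs = some L →
      List.Pairwise (fun p q => p.1 < q.1) xs →
      List.Pairwise (fun a b => a.2.1 < b.2.1) L ∧ ∀ e ∈ L, ∃ p ∈ xs, e.2.1 = p.1 := by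
  intro xs
  induction xs with
  | nil => intro L hL _; rw [pvLogsA?] at hL; cases hL; simp
  | cons p rest ih =>
    intro L hL hpw
    obtain ⟨o, mus⟩ := p
    rw [pvLogsA?] at hL
    rcases hE : pvEntryA? o mus with _ | e? <;> rw [hE] at hL
    · simp at hL
    rcases hR : pvLogsA? rest with _ | L' <;> rw [hR] at hL
    · simp at hL
    obtain ⟨hpw', hmem⟩ := ih L' hR (List.Pairwise.sublist (List.sublist_cons_self _ _) hpw)
    cases e? with
    | none =>
      cases hL
      exact ⟨hpw', fun e he => (hmem e he).imp (fun q hq => ⟨List.mem_cons_of_mem _ hq.1, hq.2⟩)⟩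
    | some e =>
      cases hL
      have heo : e.2.1 = o := entryA_order hE
      refine ⟨List.Pairwise.cons ?_ hpw', ?_⟩
      · intro e' he'
        obtain ⟨q, hq, hq2⟩ := hmem e' he'
        have := (List.pairwise_cons.mp hpw).1 q hq
        omega
      · intro e' he'
        rcases List.mem_cons.mp he' with h1 | h1
        · exact ⟨(o, mus), by simp, by rw [h1, heo]⟩
        · exact (hmem e' h1).imp (fun q hq => ⟨List.mem_cons_of_mem _ hq.1, hq.2⟩)

theorem fold_min :
    ∀ (L : List (Int × Int × String × String)) (c : Int × Int × String),
      (∀ e ∈ L, c.2.1 < e.2.1) →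
      List.Pairwise (fun a b => a.2.1 < b.2.1) L →
      (L.foldl pvG (some c) = some c ∧ ∀ e ∈ L, pvKlt (pvKeyT c) (pvKeyA e))
      ∨ (∃ e' ∈ L, L.foldl pvG (some c) = some (pvProj e')
          ∧ pvKlt (pvKeyA e') (pvKeyT c)
          ∧ ∀ e ∈ L, e = e' ∨ pvKlt (pvKeyA e') (pvKeyA e)) := by
  intro L
  induction L with
  | nil => intro c _ _; left; simp
  | cons e L ih =>
    intro c hord hpw
    have hordL : ∀ e' ∈ L, e.2.1 < e'.2.1 := (List.pairwise_cons.mp hpw).1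
    have hpwL : List.Pairwise (fun a b => a.2.1 < b.2.1) L := (List.pairwise_cons.mp hpw).2
    have hce : c.2.1 < e.2.1 := hord e (by simp)
    rw [List.foldl_cons]
    by_cases hlt : c.1 < -e.1
    · -- the accumulator is replaced by (the projection of) e
      have hstep : pvG (some c) e = some (pvProj e) := by simp [pvG, hlt]
      rw [hstep]
      have hordL' : ∀ e' ∈ L, (pvProj e).2.1 < e'.2.1 := by
        intro e' he'; simpa [pvProj] using hordL e' he'
      have hkey : pvKlt (pvKeyA e) (pvKeyT c) := pvKlt_first (by omega)
      rcases ih (pvProj e) hordL' hpwL with ⟨hfold, hmin⟩ | ⟨e', he', hfold, hlt', hmin⟩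
      · right
        refine ⟨e, by simp, hfold, hkey, ?_⟩
        intro e'' he''
        rcases List.mem_cons.mp he'' with h1 | h1
        · exact Or.inl h1
        · exact Or.inr (by simpa [pvKeyT_proj] using hmin e'' h1)
      · right
        refine ⟨e', List.mem_cons_of_mem _ he', hfold, ?_, ?_⟩
        · exact lt_trans (by simpa [pvKeyT_proj] using hlt') hkey
        · intro e'' he''
          rcases List.mem_cons.mp he'' with h1 | h1
          · right; rw [h1]
            exact (by simpa [pvKeyT_proj] using hlt')
          · exact hmin e'' h1
    · -- the accumulator survives this element
      have hstep : pvG (some c) e = some c := by simp [pvG, hlt]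
      rw [hstep]
      have hkey : pvKlt (pvKeyT c) (pvKeyA e) := by
        rcases lt_or_eq_of_le (by omega : -c.1 <= e.1) with h1 | h1
        · exact pvKlt_first h1
        · rw [pvKeyT, pvKeyA, ← h1]; exact pvKlt_second hce
      have hord' : ∀ e' ∈ L, c.2.1 < e'.2.1 := fun e' he' => hord e' (List.mem_cons_of_mem _ he')
      rcases ih c hord' hpwL with ⟨hfold, hmin⟩ | ⟨e', he', hfold, hlt', hmin⟩
      · left
        refine ⟨hfold, ?_⟩
        intro e'' he''
        rcases List.mem_cons.mp he'' with h1 | h1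
        · rw [h1]; exact hkey
        · exact hmin e'' h1
      · right
        refine ⟨e', List.mem_cons_of_mem _ he', hfold, hlt', ?_⟩
        intro e'' he''
        rcases List.mem_cons.mp he'' with h1 | h1
        · right; rw [h1]; exact lt_trans hlt' hkey
        · exact hmin e'' h1

theorem sorted_head {L : List (Int × Int × String × String)} {e' : Int × Int × String × String}
    (he' : e' ∈ L)
    (hmin : ∀ e ∈ L, e = e' ∨ pvKlt (pvKeyA e') (pvKeyA e)) :
    ∃ t, @PySem.List.sorted _ (List Int) List.instLinearOrder.toLT
        LinearOrder.toDecidableLT L pvKeyA false = e' :: t := by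
  cases hs : @PySem.List.sorted _ (List Int) List.instLinearOrder.toLT
      LinearOrder.toDecidableLT L pvKeyA false with
  | nil =>
    rw [@PySem.List.sorted_eq_nil_iff _ _ List.instLinearOrder.toLT
      LinearOrder.toDecidableLT] at hs
    rw [hs] at he'; exact absurd he' (List.not_mem_nil)
  | cons h t =>
    have hmem : h ∈ L := by
      have := (@PySem.List.mem_sorted _ _ List.instLinearOrder.toLT
        LinearOrder.toDecidableLT L pvKeyA false h).mp (by rw [hs]; exact List.mem_cons_self)
      exact this
    have hle : pvKeyA h ≤ pvKeyA e' := PySem.List.key_head_sorted_le L pvKeyA hs e' he'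
    rcases hmin h hmem with h1 | h1
    · exact ⟨t, by rw [h1]⟩
    · exact absurd (lt_of_lt_of_le h1 hle) (lt_irrefl _)

-- ===== VERDICT (by name: the statement is the Claim_ definition above) =====
theorem solution_spec : Claim_equal_solution := by
  intro m infos _hDom hPre
  show solution m infos = solution_alt m infos
  have hall : ∀ p ∈ PySem.List.enumerate infos, pvOkB p.2 = true := by
    intro p hp
    obtain ⟨k, hk, rfl⟩ := (PySem.List.mem_enumerate_iff infos 0 p).mp hp
    exact hPre _ (List.getElem_mem hk)
  rw [solution, solution_alt, runB_eq (pvRemoveSharp m) _ none hall]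
  cases hlogs : pvLogsA? (PySem.List.enumerate infos) with
  | none => rfl
  | some logs =>
    simp only [Option.map]
    have hpw : List.Pairwise (fun a b => a.2.1 < b.2.1) logs :=
      (logsA_orders _ logs hlogs (PySem.List.pairwise_lt_enumerate infos 0)).1
    have hfilter :
        logs.foldl (pvBStep (pvRemoveSharp m)) none
          = (logs.filter (fun e => PySem.Str.isIn (pvRemoveSharp m) e.2.2.2)).foldl pvG none := by
      rw [List.foldl_filter]; rfl
    have hpwI : List.Pairwise (fun a b => a.2.1 < b.2.1)
        (logs.filter (fun e => PySem.Str.isIn (pvRemoveSharp m) e.2.2.2)) :=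
      List.Pairwise.filter _ hpw
    rw [hfilter]
    cases hinv : logs.filter (fun e => PySem.Str.isIn (pvRemoveSharp m) e.2.2.2) with
    | nil => rfl
    | cons e rest =>
      rw [hinv] at hpwI
      have hordL : ∀ e' ∈ rest, (pvProj e).2.1 < e'.2.1 := by
        intro e' he'
        simpa [pvProj] using (List.pairwise_cons.mp hpwI).1 e' he'
      have hstep0 : (e :: rest).foldl pvG none = rest.foldl pvG (some (pvProj e)) := by
        rw [List.foldl_cons]; rfl
      -- a single best element e' of involve: the fold returns it and its key is strictly minimal
      obtain ⟨e', he', hfold, hmin⟩ :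
          ∃ e' ∈ e :: rest, rest.foldl pvG (some (pvProj e)) = some (pvProj e')
            ∧ ∀ e'' ∈ e :: rest, e'' = e' ∨ pvKlt (pvKeyA e') (pvKeyA e'') := by
        rcases fold_min rest (pvProj e) hordL (List.pairwise_cons.mp hpwI).2 with
          ⟨hfold, hmin⟩ | ⟨e', he', hfold, hlt', hmin⟩
        · refine ⟨e, List.mem_cons_self, hfold, ?_⟩
          intro e'' he''
          rcases List.mem_cons.mp he'' with h1 | h1
          · exact Or.inl h1
          · exact Or.inr (by simpa [pvKeyT_proj] using hmin e'' h1)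
        · refine ⟨e', List.mem_cons_of_mem _ he', hfold, ?_⟩
          intro e'' he''
          rcases List.mem_cons.mp he'' with h1 | h1
          · right; rw [h1]; exact (by simpa [pvKeyT_proj] using hlt')
          · exact hmin e'' h1
      rw [hstep0, hfold]
      show (if (e :: rest : List (Int × Int × String × String)).length > 1 then
          match @PySem.List.sorted _ (List Int) List.instLinearOrder.toLT
              LinearOrder.toDecidableLT (e :: rest) pvKeyA false with
          | [] => ""
          | e'' :: _ => e''.2.2.1
        else e.2.2.1) = (pvProj e').2.2
      by_cases hlen : (e :: rest : List (Int × Int × String × String)).length > 1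
      · rw [if_pos hlen]
        obtain ⟨t, hs⟩ := sorted_head he' hmin
        rw [hs]
        rfl
      · rw [if_neg hlen]
        have hrest : rest = [] := by
          cases rest with
          | nil => rfl
          | cons x xs => exact absurd (by simp) hlen
        subst hrest
        rcases List.mem_cons.mp he' with h1 | h1
        · rw [h1]; rfl
        · exact absurd h1 (List.not_mem_nil)
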